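-- pv_equiv track=rewrite | github.com/rtritz/trackinsights | web/backend/queries.py | _project_place
-- ===== SOURCE A (Python) =====
-- SPRINT_DNQ_EVENTS = {
--     "100 Meters",
--     "200 Meters",
--     "100 Hurdles",
--     "110 Hurdles",
-- }
--
-- def _project_place(result_values, candidate_value, event_type: str, event_name: str) -> str:
--     comparator = (lambda existing: existing < candidate_value) if _is_lower_better(event_type) else (
--         lambda existing: existing > candidate_value
--     )
--
--     for index, existing in enumerate(result_values, start=1):
--         if not comparator(existing):
--             return str(index)
--
--     if event_name in SPRINT_DNQ_EVENTS:
--         return "DNQ for Finals"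
--
--     return str(len(result_values) + 1)
--
-- def _is_lower_better(event_type: str) -> bool:
--     return event_type != "Field"
-- ===== SOURCE B (Python) =====
-- SPRINT_DNQ_EVENTS = {
--     "100 Meters",
--     "200 Meters",
--     "100 Hurdles",
--     "110 Hurdles",
-- }
--
--
-- def _project_place(result_values, candidate_value, event_type, event_name):
--     lower_better = event_type != "Field"
--     vals = list(result_values)
--
--     def first_stop(lo, hi):
--         # 0-based index of the first value in vals[lo:hi] that does not beat
--         # the candidate, found by divide and conquer on index halves.
--         if hi - lo == 0:
--             return None
--         if hi - lo == 1:
--             v = vals[lo]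
--             beats = v < candidate_value if lower_better else v > candidate_value
--             return None if beats else lo
--         mid = (lo + hi) // 2
--         left = first_stop(lo, mid)
--         return left if left is not None else first_stop(mid, hi)
--
--     idx = first_stop(0, len(vals))
--     if idx is not None:
--         return str(idx + 1)
--     if event_name in SPRINT_DNQ_EVENTS:
--         return "DNQ for Finals"
--     return str(len(vals) + 1)
-- ===== Notes on version B (the rewrite author's own statement) =====
-- stated objective: alternative
-- what changed: Replaces A's left-to-right enumerate scan with early return by a divide-and-conquer recursion that halves the index range and merges with a left-biased or-else to locate the first non-beating value.
import Mathlib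
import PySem

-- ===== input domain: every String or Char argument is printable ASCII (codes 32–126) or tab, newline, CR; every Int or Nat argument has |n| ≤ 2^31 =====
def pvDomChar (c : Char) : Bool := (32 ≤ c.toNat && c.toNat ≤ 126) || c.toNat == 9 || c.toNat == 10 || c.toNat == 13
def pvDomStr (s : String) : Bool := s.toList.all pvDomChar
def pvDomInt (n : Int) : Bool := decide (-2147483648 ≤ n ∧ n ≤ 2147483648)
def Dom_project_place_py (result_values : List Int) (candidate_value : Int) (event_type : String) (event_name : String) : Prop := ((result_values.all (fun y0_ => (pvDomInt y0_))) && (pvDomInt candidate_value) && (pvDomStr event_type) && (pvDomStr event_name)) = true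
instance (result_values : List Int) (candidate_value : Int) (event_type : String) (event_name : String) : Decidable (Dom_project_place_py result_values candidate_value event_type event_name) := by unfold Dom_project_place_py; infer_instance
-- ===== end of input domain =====

-- ===== PORT A =====
-- B replaces A's linear enumerate scan (early return) by a divide-and-conquer search
-- over index halves for the first non-beating value; objective: alternative (same O(n) cost).

-- shared module constant: the Python set SPRINT_DNQ_EVENTS
def sprintDNQEvents : PySem.Set String :=
  PySem.Set.ofList ["100 Meters", "200 Meters", "100 Hurdles", "110 Hurdles"]

def pyIsLowerBetter (event_type : String) : Bool := event_type != "Field"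

-- the 'for index, existing in enumerate(result_values, start=1)' loop with early return
def pyPlaceLoop (comparator : Int → Bool) : List Int → Int → Option Int
  | [], _ => none
  | existing :: rest, index =>
      if !(comparator existing) then some index else pyPlaceLoop comparator rest (index + 1)

def project_place_py (result_values : List Int) (candidate_value : Int) (event_type : String) (event_name : String) : String :=
  let comparator : Int → Bool :=
    if pyIsLowerBetter event_type then (fun existing => decide (existing < candidate_value))
    else (fun existing => decide (existing > candidate_value))
  match pyPlaceLoop comparator result_values 1 with
  | some index => PySem.Int.toStr index
  | none =>
      if sprintDNQEvents.contains event_name then "DNQ for Finals"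
      else PySem.Int.toStr ((result_values.length : Int) + 1)

-- ===== PORT B =====
-- 'v < candidate_value if lower_better else v > candidate_value'
def altBeats (lower : Bool) (cand v : Int) : Bool :=
  if lower then decide (v < cand) else decide (v > cand)

-- Python's nested 'first_stop(lo, hi)': divide and conquer on the index range.
-- The recursion is well-founded on hi - lo; it is encoded structurally with fuel = hi - lo.
-- vals[lo] is ported as getD lo 0; the recursion keeps lo in range, so the default is unreachable.
def altFirstStop (vals : List Int) (cand : Int) (lower : Bool) : Nat → Nat → Nat → Option Nat
  | 0, _, _ => none
  | fuel + 1, lo, hi =>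
    if hi - lo = 0 then none
    else if hi - lo = 1 then
      if altBeats lower cand (vals.getD lo 0) then none else some lo
    else
      let mid := (lo + hi) / 2
      match altFirstStop vals cand lower fuel lo mid with
      | some k => some k
      | none => altFirstStop vals cand lower fuel mid hi

def project_place_py_alt (result_values : List Int) (candidate_value : Int) (event_type : String) (event_name : String) : String :=
  let lower := event_type != "Field"
  match altFirstStop result_values candidate_value lower result_values.length 0 result_values.length with
  | some idx => PySem.Int.toStr ((idx : Int) + 1)
  | none =>
      if sprintDNQEvents.contains event_name then "DNQ for Finals"
      else PySem.Int.toStr ((result_values.length : Int) + 1)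

-- ===== PRECONDITION & SPEC =====
def Spec_project_place_py (result_values : List Int) (candidate_value : Int) (event_type : String) (event_name : String) (out : String) : Prop := out = project_place_py_alt result_values candidate_value event_type event_name
instance (result_values : List Int) (candidate_value : Int) (event_type : String) (event_name : String) (out : String) : Decidable (Spec_project_place_py result_values candidate_value event_type event_name out) := by unfold Spec_project_place_py; infer_instance

-- ===== CLAIM (what is proved, stated in full; the proofs are below) =====
def Claim_equal_project_place_py : Prop := ∀ (result_values : List Int) (candidate_value : Int) (event_type : String) (event_name : String), Dom_project_place_py result_values candidate_value event_type event_name → Spec_project_place_py result_values candidate_value event_type event_name (project_place_py result_values candidate_value event_type event_name)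

-- ===== LEMMAS AND PROOFS =====

-- A's loop is findIdx? of the first non-beating value, offset by the start index.
theorem placeLoop_eq_findIdx? (f : Int → Bool) (xs : List Int) (i : Int) :
    pyPlaceLoop f xs i = (xs.findIdx? (fun v => !(f v))).map (fun k => i + (k : Int)) := by
  induction xs generalizing i with
  | nil => simp [pyPlaceLoop]
  | cons x xs ih =>
    by_cases h : f x
    · simp [pyPlaceLoop, h, List.findIdx?_cons, ih]
      cases xs.findIdx? (fun v => !(f v)) <;> (simp; try ring)
    · simp [pyPlaceLoop, h, List.findIdx?_cons]

-- B's divide and conquer equals find? over the index range (induction on the fuel).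
theorem altFirstStop_eq_find?_aux (vals : List Int) (cand : Int) (lower : Bool) :
    ∀ (fuel lo hi : Nat), hi - lo ≤ fuel →
    altFirstStop vals cand lower fuel lo hi
      = (List.range' lo (hi - lo)).find? (fun k => !(altBeats lower cand (vals.getD k 0))) := by
  intro fuel
  induction fuel with
  | zero =>
    intro lo hi hf
    rw [show hi - lo = 0 by omega]
    simp [altFirstStop]
  | succ fuel ih =>
    intro lo hi hf
    rw [altFirstStop]
    split_ifs with h0 h1 hb
    · rw [h0]; simp
    · rw [h1, List.range'_one]
      simp only [List.getD] at hb ⊢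
      simp [hb]
    · rw [h1, List.range'_one]
      simp only [List.getD] at hb ⊢
      simp [hb]
    · have hsplit : List.range' lo (hi - lo)
          = List.range' lo ((lo + hi) / 2 - lo) ++ List.range' ((lo + hi) / 2) (hi - (lo + hi) / 2) := by
        have h := @List.range'_append lo ((lo + hi) / 2 - lo) (hi - (lo + hi) / 2) 1
        rw [show lo + 1 * ((lo + hi) / 2 - lo) = (lo + hi) / 2 by omega,
            show (lo + hi) / 2 - lo + (hi - (lo + hi) / 2) = hi - lo by omega] at h
        exact h.symm
      rw [hsplit, List.find?_append,
          ← ih lo ((lo + hi) / 2) (by omega),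
          ← ih ((lo + hi) / 2) hi (by omega)]
      cases h : altFirstStop vals cand lower fuel lo ((lo + hi) / 2) <;> simp [h, Option.or]

theorem altFirstStop_eq_find? (vals : List Int) (cand : Int) (lower : Bool) (fuel lo hi : Nat)
    (hf : hi - lo ≤ fuel) :
    altFirstStop vals cand lower fuel lo hi
      = (List.range' lo (hi - lo)).find? (fun k => !(altBeats lower cand (vals.getD k 0))) :=
  altFirstStop_eq_find?_aux vals cand lower fuel lo hi hf

-- find? over an index range equals findIdx? on the dropped suffix, offset by the start.
theorem find?_drop_eq (p : Int → Bool) (vals : List Int) :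
    ∀ (xs : List Int) (lo : Nat), vals.drop lo = xs →
    (List.range' lo xs.length).find? (fun k => p (vals.getD k 0))
      = (xs.findIdx? p).map (· + lo) := by
  intro xs
  induction xs with
  | nil => intro lo _; simp
  | cons x xs ih =>
    intro lo h
    have hget : vals.getD lo 0 = x := by
      have h0 : vals[lo]? = some x := by
        have h1 := @List.getElem?_drop Int vals lo 0
        rw [h] at h1; simpa using h1.symm
      simp [List.getD, h0]
    have hdrop : vals.drop (lo + 1) = xs := by
      have h2 : vals.drop (lo + 1) = (vals.drop lo).drop 1 := by
        rw [List.drop_drop]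
      rw [h2, h]; rfl
    simp only [List.getD] at hget
    rw [show (x :: xs).length = xs.length + 1 from rfl, List.range'_succ, List.find?_cons,
        List.findIdx?_cons]
    simp only [List.getD]
    by_cases hp : p x
    · simp [hget, hp]
    · simp only [List.getD] at ih
      rw [ih (lo + 1) hdrop]
      simp only [hget, hp]
      cases xs.findIdx? p with
      | none => simp
      | some k => simp; omega

-- ===== VERDICT (by name: the statement is the Claim_ definition above) =====
theorem project_place_py_spec : Claim_equal_project_place_py := by
  intro rv cv et en _
  simp only [Spec_project_place_py, project_place_py, project_place_py_alt]
  have hcomp : (fun v => !((if pyIsLowerBetter et then (fun e : Int => decide (e < cv))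
        else (fun e : Int => decide (e > cv))) v))
      = fun v => !(altBeats (et != "Field") cv v) := by
    funext v
    by_cases h : et == "Field" <;> simp [pyIsLowerBetter, altBeats, bne, h]
  rw [placeLoop_eq_findIdx?, altFirstStop_eq_find? rv cv (et != "Field") rv.length 0 rv.length (by omega), Nat.sub_zero, hcomp,
      find?_drop_eq (fun v => !(altBeats (et != "Field") cv v)) rv rv 0 (by simp)]
  cases h : rv.findIdx? (fun v => !(altBeats (et != "Field") cv v)) with
  | none => simp
  | some k => simp; congr 1; ring
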